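-- pv_equiv track=rewrite | github.com/sitnaltax/aoc2023 | 12/12b-broad.py | evaluate_pattern_leniently
-- ===== SOURCE A (Python) =====
-- def evaluate_pattern_leniently(pattern, criteria):
--     blocks = [token for token in pattern.split('.') if len(token) > 0]
--     for (index, block) in enumerate(blocks):
--         if block.find("?") > -1:
--             return True
--         if index >= len(criteria):
--             return False
--         if len(block) != int(criteria[index]):
--             return False
--     return True
-- ===== SOURCE B (Python) =====
-- def evaluate_pattern_leniently(pattern, criteria):
--     index = 0
--     run = 0
--     wild = False
--     for ch in pattern + '.':
--         if ch == '.':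
--             if run > 0:
--                 if wild:
--                     return True
--                 if index >= len(criteria) or run != int(criteria[index]):
--                     return False
--                 index += 1
--                 run = 0
--                 wild = False
--         else:
--             run += 1
--             wild = wild or ch == '?'
--     return True
-- ===== Notes on version B (the rewrite author's own statement) =====
-- stated objective: alternative
-- what changed: B never builds the block list: it streams over the characters of pattern + '.' once, keeping only a run length, a wildcard flag and a criteria index, flushing each run against criteria at every '.' boundary, whereas A first splits the pattern into blocks and then loops over them by index.
import Mathlib
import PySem

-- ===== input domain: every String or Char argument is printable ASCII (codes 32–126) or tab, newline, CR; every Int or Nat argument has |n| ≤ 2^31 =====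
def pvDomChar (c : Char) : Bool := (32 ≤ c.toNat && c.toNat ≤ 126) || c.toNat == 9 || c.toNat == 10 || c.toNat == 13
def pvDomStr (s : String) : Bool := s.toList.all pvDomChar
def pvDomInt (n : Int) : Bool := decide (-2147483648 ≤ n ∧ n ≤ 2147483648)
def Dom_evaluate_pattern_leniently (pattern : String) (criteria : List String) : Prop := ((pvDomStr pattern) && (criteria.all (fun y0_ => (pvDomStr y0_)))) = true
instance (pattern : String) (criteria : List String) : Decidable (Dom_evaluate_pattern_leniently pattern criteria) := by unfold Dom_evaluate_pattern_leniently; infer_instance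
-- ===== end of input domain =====

-- B replaces A's split-into-blocks-then-loop by a single character-level scan of pattern + '.'
-- that keeps only a run length and a wildcard flag (objective: alternative — no block list is built).

-- ===== PORT A =====
-- the for-loop over enumerate(blocks); int(criteria[index]) raising ValueError is the `none`
-- branch (returns an arbitrary false; exactly those inputs are excluded by Pre_).
def pvA_loop (criteria : List String) : Nat → List String → Bool
  | _, [] => true
  | index, block :: rest =>
    if PySem.Str.find block "?" > -1 then true
    else if index ≥ criteria.length then false
    else
      match PySem.Int.ofStr? (criteria.getD index "") with
      | none => false  -- Python: int() raises ValueError here (outside Pre_)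
      | some n => if (PySem.Str.len block) ≠ n then false else pvA_loop criteria (index + 1) rest

def evaluate_pattern_leniently (pattern : String) (criteria : List String) : Bool :=
  let blocks := ((PySem.Str.split? pattern ".").getD []).filter (fun t => PySem.Str.len t > 0)
  pvA_loop criteria 0 blocks

-- ===== PORT B =====
-- the for-loop `for ch in pattern + '.'` with state (index, run, wild); the two early returns
-- in the flush are the `true`/`false` leaves; int() raising ValueError is the `none` branch.
def pvB_loop (criteria : List String) : Nat → Nat → Bool → List Char → Bool
  | _, _, _, [] => true
  | index, run, wild, ch :: rest =>
    if ch = '.' then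
      if run > 0 then
        if wild then true
        else if index ≥ criteria.length then false
        else
          match PySem.Int.ofStr? (criteria.getD index "") with
          | none => false  -- Python: int() raises ValueError here (outside Pre_)
          | some n =>
            if (run : Int) ≠ n then false
            else pvB_loop criteria (index + 1) 0 false rest
      else pvB_loop criteria index run wild rest
    else pvB_loop criteria index (run + 1) (wild || ch == '?') rest

def evaluate_pattern_leniently_alt (pattern : String) (criteria : List String) : Bool :=
  pvB_loop criteria 0 0 false (pattern.toList ++ ['.'])

-- ===== PRECONDITION & SPEC =====
-- Pre_ excludes exactly the inputs where A raises ValueError: the loop reaches an in-bounds,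
-- '?'-free block whose criteria entry is not parseable by int().
def Pre_evaluate_pattern_leniently (pattern : String) (criteria : List String) : Prop :=
  let blocks := ((PySem.Str.split? pattern ".").getD []).filter (fun t => PySem.Str.len t > 0)
  ∀ i, i < blocks.length → i < criteria.length →
    (∀ j, j < i → PySem.Str.isIn "?" (blocks.getD j "") = false ∧
                  PySem.Int.ofStr? (criteria.getD j "") = some (PySem.Str.len (blocks.getD j ""))) →
    PySem.Str.isIn "?" (blocks.getD i "") = true ∨ (PySem.Int.ofStr? (criteria.getD i "")).isSome
instance (pattern : String) (criteria : List String) : Decidable (Pre_evaluate_pattern_leniently pattern criteria) := by unfold Pre_evaluate_pattern_leniently; infer_instance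

def pvWitness_evaluate_pattern_leniently : String × List String := ("#.##", ["1", "2"])

def Spec_evaluate_pattern_leniently (pattern : String) (criteria : List String) (out : Bool) : Prop := out = evaluate_pattern_leniently_alt pattern criteria
instance (pattern : String) (criteria : List String) (out : Bool) : Decidable (Spec_evaluate_pattern_leniently pattern criteria out) := by unfold Spec_evaluate_pattern_leniently; infer_instance

-- ===== CLAIM (what is proved, stated in full; the proofs are below) =====
def Claim_equal_evaluate_pattern_leniently : Prop := ∀ (pattern : String) (criteria : List String), Dom_evaluate_pattern_leniently pattern criteria → Pre_evaluate_pattern_leniently pattern criteria → Spec_evaluate_pattern_leniently pattern criteria (evaluate_pattern_leniently pattern criteria)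

-- ===== LEMMAS AND PROOFS =====

-- unfolding equations for PySem.Chars.splitOn.go at the single-character separator '.'
lemma pv_go_nil (f : Nat) (cur : List Char) (acc : List (List Char)) :
    PySem.Chars.splitOn.go ['.'] (f + 1) [] cur acc = (cur.reverse :: acc).reverse := by
  rw [PySem.Chars.splitOn.go]
  omega

lemma pv_go_dot (f : Nat) (cur rest : List Char) (acc : List (List Char)) :
    PySem.Chars.splitOn.go ['.'] (f + 1) ('.' :: rest) cur acc =
      PySem.Chars.splitOn.go ['.'] f rest [] (cur.reverse :: acc) := by
  rw [PySem.Chars.splitOn.go]; simp [List.isPrefixOf]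

lemma pv_go_cons (f : Nat) (c : Char) (hc : ¬ c = '.') (cur rest : List Char) (acc : List (List Char)) :
    PySem.Chars.splitOn.go ['.'] (f + 1) (c :: rest) cur acc =
      PySem.Chars.splitOn.go ['.'] f rest (c :: cur) acc := by
  rw [PySem.Chars.splitOn.go]
  simp only [List.isPrefixOf, Bool.and_true]
  rw [if_neg]
  simp only [beq_iff_eq]
  intro h; exact hc h.symm

-- go only ever appends to its accumulator
lemma pv_go_acc (f : Nat) : ∀ (l cur : List Char) (acc : List (List Char)),
    PySem.Chars.splitOn.go ['.'] f l cur acc =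
      acc.reverse ++ PySem.Chars.splitOn.go ['.'] f l cur [] := by
  induction f with
  | zero =>
    intro l cur acc
    rw [PySem.Chars.splitOn.go, PySem.Chars.splitOn.go]
    simp
  | succ f ih =>
    intro l cur acc
    cases l with
    | nil => rw [pv_go_nil, pv_go_nil]; simp
    | cons c rest =>
      by_cases hc : c = '.'
      · subst hc
        rw [pv_go_dot, pv_go_dot, ih rest [] (cur.reverse :: acc), ih rest [] [cur.reverse]]
        simp
      · rw [pv_go_cons f c hc, pv_go_cons f c hc, ih rest (c :: cur) acc]

-- `block.find("?") > -1` is membership of '?' in the block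
lemma pv_find_q (l : List Char) : (PySem.Chars.find l ['?'] > -1) ↔ '?' ∈ l := by
  have h1 : (PySem.Chars.find l ['?'] > -1) ↔ 0 ≤ PySem.Chars.find l ['?'] := by omega
  rw [h1, PySem.Chars.find_nonneg_iff]
  constructor
  · intro h; exact h.mem (by simp)
  · intro h
    obtain ⟨a, b, rfl⟩ := List.mem_iff_append.1 h
    exact ⟨a, b, by simp⟩

-- A's loop, restated on the underlying character lists
def pvA_loopL (criteria : List String) : Nat → List (List Char) → Bool
  | _, [] => true
  | index, block :: rest =>
    if PySem.Chars.find block ['?'] > -1 then true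
    else if index ≥ criteria.length then false
    else
      match PySem.Int.ofStr? (criteria.getD index "") with
      | none => false
      | some n => if (block.length : Int) ≠ n then false else pvA_loopL criteria (index + 1) rest

lemma pvA_loop_map (criteria : List String) :
    ∀ (bs : List (List Char)) (idx : Nat),
      pvA_loop criteria idx (bs.map String.ofList) = pvA_loopL criteria idx bs := by
  intro bs
  induction bs with
  | nil => intro idx; rfl
  | cons b rest ih =>
    intro idx
    show pvA_loop criteria idx (String.ofList b :: rest.map String.ofList) = _
    rw [pvA_loop, pvA_loopL]
    have hf : PySem.Str.find (String.ofList b) "?" = PySem.Chars.find b ['?'] := by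
      simp [PySem.Str.find_eq]
    have hl : (PySem.Str.len (String.ofList b) : Int) = (b.length : Int) := by
      simp [PySem.Str.len_eq]
    rw [hf, hl, ih]

-- B's flush of a nonempty run (read as a :: as, newest first) is one step of A's loop on the
-- block (a :: as).reverse, for any matching continuations.
lemma pv_flush (criteria : List String) (a : Char) (as : List Char) (idx : Nat)
    (bs : List (List Char)) (tB : Bool) (ht : tB = pvA_loopL criteria (idx + 1) bs) :
    (if decide ('?' ∈ a :: as) = true then true
     else if idx ≥ criteria.length then false
     else match PySem.Int.ofStr? (criteria.getD idx "") with
       | none => false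
       | some n => if (((a :: as).length : Nat) : Int) ≠ n then false else tB)
    = pvA_loopL criteria idx ((as.reverse ++ [a]) :: bs) := by
  rw [pvA_loopL]
  have hq : (PySem.Chars.find (as.reverse ++ [a]) ['?'] > -1) ↔ ('?' ∈ a :: as) := by
    rw [pv_find_q]; simp [List.mem_append, List.mem_reverse, List.mem_cons, or_comm]
  have hlen : (((as.reverse ++ [a]).length : Nat) : Int) = (((a :: as).length : Nat) : Int) := by
    simp
  rw [hlen]
  by_cases h1 : '?' ∈ a :: as
  · rw [if_pos (by simpa using h1), if_pos (hq.2 h1)]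
  · rw [if_neg (by simpa using h1), if_neg (fun hh => h1 (hq.1 hh))]
    by_cases h2 : idx ≥ criteria.length
    · rw [if_pos h2, if_pos h2]
    · rw [if_neg h2, if_neg h2]
      cases PySem.Int.ofStr? (criteria.getD idx "") with
      | none => rfl
      | some n =>
        show (if (((a :: as).length : Nat) : Int) ≠ n then false else tB) =
          (if (((a :: as).length : Nat) : Int) ≠ n then false else pvA_loopL criteria (idx + 1) bs)
        by_cases h3 : (((a :: as).length : Nat) : Int) ≠ n
        · rw [if_pos h3, if_pos h3]
        · rw [if_neg h3, if_neg h3]; exact ht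

-- core invariant: B's scan with state (idx, run = cur.length, wild = '?' ∈ cur) over the unread
-- characters equals A's loop over the nonempty blocks that splitOn.go still produces.
lemma pv_main (criteria : List String) :
    ∀ (fuel : Nat) (cs : List Char), cs.length < fuel → ∀ (cur : List Char) (idx : Nat),
      pvB_loop criteria idx cur.length (decide ('?' ∈ cur)) (cs ++ ['.']) =
        pvA_loopL criteria idx
          ((PySem.Chars.splitOn.go ['.'] fuel cs cur []).filter (fun l => decide (l.length > 0))) := by
  intro fuel
  induction fuel with
  | zero => intro cs h; omega
  | succ f ih =>
    intro cs hlen cur idx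
    cases cs with
    | nil =>
      rw [pv_go_nil]
      show pvB_loop criteria idx cur.length (decide ('?' ∈ cur)) ['.'] = _
      rw [pvB_loop, if_pos rfl]
      cases cur with
      | nil => simp [pvB_loop, pvA_loopL]
      | cons a as =>
        simp only [List.reverse_cons, List.reverse_nil, List.nil_append, List.filter_singleton,
          show (decide ((as.reverse ++ [a]).length > 0)) = true from by simp, cond_true]
        exact pv_flush criteria a as idx [] _ rfl
    | cons c rest =>
      have hrest : rest.length < f := by simp at hlen; omega
      by_cases hc : c = '.'
      · subst hc
        rw [pv_go_dot, pv_go_acc]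
        show pvB_loop criteria idx cur.length (decide ('?' ∈ cur)) ('.' :: (rest ++ ['.'])) = _
        rw [pvB_loop, if_pos rfl]
        cases cur with
        | nil =>
          simp only [List.reverse_nil, List.reverse_cons, List.nil_append, List.filter_append,
            List.filter_singleton, show (decide (([] : List Char).length > 0)) = false from rfl,
            cond_false]
          exact ih rest hrest [] idx
        | cons a as =>
          simp only [List.reverse_cons, List.reverse_nil, List.nil_append, List.singleton_append]
          rw [List.filter_cons_of_pos (by simp)]
          exact pv_flush criteria a as idx _ _ (ih rest hrest [] (idx + 1))
      · rw [pv_go_cons f c hc]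
        show pvB_loop criteria idx cur.length (decide ('?' ∈ cur)) (c :: (rest ++ ['.'])) = _
        rw [pvB_loop, if_neg hc]
        have hwild : (decide ('?' ∈ cur) || (c == '?')) = decide ('?' ∈ c :: cur) := by
          by_cases h : c = '?'
          · subst h
            have hm : '?' ∈ '?' :: cur := List.mem_cons_self
            simp [hm]
          · have hb : (c == '?') = false := by simpa using h
            have hiff : ('?' ∈ c :: cur) ↔ ('?' ∈ cur) := by
              rw [List.mem_cons]
              constructor
              · rintro (h1 | h1)
                · exact absurd h1.symm h
                · exact h1
              · exact Or.inr
            rw [hb, Bool.or_false, decide_eq_decide.mpr hiff]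
        rw [hwild]
        have hrun : cur.length + 1 = (c :: cur).length := rfl
        rw [hrun]
        exact ih rest hrest (c :: cur) idx

-- ===== VERDICT (by name: the statement is the Claim_ definition above) =====
theorem evaluate_pattern_leniently_spec : Claim_equal_evaluate_pattern_leniently := by
  intro pattern criteria _ _
  unfold Spec_evaluate_pattern_leniently evaluate_pattern_leniently evaluate_pattern_leniently_alt
  have hsplit : (PySem.Str.split? pattern ".").getD [] =
      (PySem.Chars.splitOn pattern.toList ['.']).map String.ofList := by
    simp [PySem.Str.split?, PySem.Chars.split?]
  rw [hsplit]
  have hfilt : ((PySem.Chars.splitOn pattern.toList ['.']).map String.ofList).filter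
      (fun t => decide (PySem.Str.len t > 0)) =
      ((PySem.Chars.splitOn pattern.toList ['.']).filter (fun l => decide (l.length > 0))).map
        String.ofList := by
    rw [List.filter_map]
    congr 1
    apply List.filter_congr
    intro l _
    simp [PySem.Str.len_eq]
  rw [hfilt, pvA_loop_map]
  rw [PySem.Chars.splitOn]
  have := pv_main criteria (pattern.toList.length + 1) pattern.toList (by omega) [] 0
  simpa using this.symm
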